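-- pv_equiv track=rewrite | github.com/lelyu/AlgorithmsFall2022 | test.py | parse
-- ===== SOURCE A (Python) =====
-- def parse(str):
--     indices = []
--     values = []
--     for c in str.split():
--         if len(indices) < 1:
--             indices = c.replace("(", "").replace(")", "").split(",")
--         else:
--             values = c.replace("(", "").replace(")", "").split(",")
--     return [indices, values]
-- ===== SOURCE B (Python) =====
-- def _clean(token):
--     return token.replace("(", "").replace(")", "").split(",")
--
--
-- def parse(str):
--     tokens = str.split()
--     if not tokens:
--         return [[], []]
--     values = _clean(tokens[-1]) if len(tokens) > 1 else []
--     return [_clean(tokens[0]), values]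
-- ===== Notes on version B (the rewrite author's own statement) =====
-- stated objective: simpler
-- what changed: Replaces A's iterate-and-overwrite loop with a split-once decomposition: a shared cleaning helper applied directly to the first and (when present) the last whitespace token.
import Mathlib
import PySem

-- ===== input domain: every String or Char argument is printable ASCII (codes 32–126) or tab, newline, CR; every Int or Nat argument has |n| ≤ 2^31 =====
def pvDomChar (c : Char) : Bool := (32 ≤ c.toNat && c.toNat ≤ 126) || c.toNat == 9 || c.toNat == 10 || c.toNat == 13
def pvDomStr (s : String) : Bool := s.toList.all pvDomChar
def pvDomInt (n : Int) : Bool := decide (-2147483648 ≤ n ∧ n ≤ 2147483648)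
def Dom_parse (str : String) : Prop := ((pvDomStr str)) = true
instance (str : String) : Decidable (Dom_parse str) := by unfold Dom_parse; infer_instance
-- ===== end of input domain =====

-- B replaces A's iterate-and-overwrite loop by cleaning the first and last whitespace token directly (objective: simpler).


-- ===== PORT A =====
-- A: loop over str.split(); the first token fills `indices` (a ","-split is never empty,
-- so the `len(indices) < 1` branch fires only once), every later token overwrites `values`.
-- c.split(",") has a non-empty separator, so it never raises: ported as PySem.Chars.splitOn.
def parse (str : String) : List (List String) :=
  let r := (PySem.Str.split₀ str).foldl
    (fun (st : List String × List String) c =>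
      if st.1.length < 1 then
        ((PySem.Chars.splitOn (PySem.Str.replace (PySem.Str.replace c "(" "") ")" "").toList
            ",".toList).map String.ofList, st.2)
      else
        (st.1, (PySem.Chars.splitOn (PySem.Str.replace (PySem.Str.replace c "(" "") ")" "").toList
            ",".toList).map String.ofList))
    ([], [])
  [r.1, r.2]

-- ===== PORT B =====
-- B: token.replace("(","").replace(")","").split(",")
def parseCleanB (t : String) : List String :=
  (PySem.Chars.splitOn (PySem.Str.replace (PySem.Str.replace t "(" "") ")" "").toList
      ",".toList).map String.ofList

def parse_alt (str : String) : List (List String) :=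
  let tokens := PySem.Str.split₀ str
  match tokens with
  | [] => [[], []]
  | t :: rest =>
    [parseCleanB t,
     if rest.length > 0 then parseCleanB (PySem.List.pyGetD tokens (-1) "") else []]

-- ===== PRECONDITION & SPEC =====
def Spec_parse (str : String) (out : List (List String)) : Prop := out = parse_alt str
instance (str : String) (out : List (List String)) : Decidable (Spec_parse str out) := by unfold Spec_parse; infer_instance

-- ===== CLAIM (what is proved, stated in full; the proofs are below) =====
def Claim_equal_parse : Prop := ∀ (str : String), Dom_parse str → Spec_parse str (parse str)

-- ===== LEMMAS AND PROOFS =====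

-- the body of A's loop, named for the proofs (definitionally equal to the lambda in `parse`)
def loopF (st : List String × List String) (c : String) : List String × List String :=
  if st.1.length < 1 then (parseCleanB c, st.2) else (st.1, parseCleanB c)

-- a ","-split always yields at least one piece
lemma splitOn_go_ne_nil (sep : List Char) (fuel : Nat) :
    ∀ (l cur : List Char) (acc : List (List Char)),
      PySem.Chars.splitOn.go sep fuel l cur acc ≠ [] := by
  induction fuel with
  | zero => intro l cur acc; simp [PySem.Chars.splitOn.go]
  | succ n ih =>
      intro l cur acc
      cases l with
      | nil => simp [PySem.Chars.splitOn.go]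
      | cons c rest =>
          rw [PySem.Chars.splitOn.go]
          split
          · exact ih _ _ _
          · exact ih _ _ _

lemma parseCleanB_ne_nil (t : String) : parseCleanB t ≠ [] := by
  unfold parseCleanB PySem.Chars.splitOn
  intro h
  exact splitOn_go_ne_nil _ _ _ _ _ (by simpa using h)

-- once `indices` is non-empty, the loop only keeps overwriting `values` with the cleaned token
lemma foldl_loop (rest : List String) (ind vals : List String) (h : ind ≠ []) :
    rest.foldl loopF (ind, vals)
      = (ind, match rest.getLast? with | none => vals | some c => parseCleanB c) := by
  induction rest generalizing vals with
  | nil => simp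
  | cons c cs ih =>
      have hlen : ¬ ind.length < 1 := by
        cases ind with
        | nil => exact absurd rfl h
        | cons a as => simp
      have hstep : loopF (ind, vals) c = (ind, parseCleanB c) := by
        simp [loopF, hlen]
      rw [List.foldl_cons, hstep, ih (parseCleanB c)]
      cases cs with
      | nil => simp
      | cons d ds =>
          obtain ⟨x, hx⟩ : ∃ x, (d :: ds).getLast? = some x :=
            ⟨_, List.getLast?_eq_some_getLast (by simp)⟩
          simp [hx]

-- ===== VERDICT (by name: the statement is the Claim_ definition above) =====
theorem parse_spec : Claim_equal_parse := by
  intro str _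
  unfold Spec_parse
  have hA : parse str =
      [((PySem.Str.split₀ str).foldl loopF ([], [])).1,
       ((PySem.Str.split₀ str).foldl loopF ([], [])).2] := rfl
  rw [hA]
  unfold parse_alt
  cases htk : PySem.Str.split₀ str with
  | nil => simp
  | cons t rest =>
      have hstep : loopF ([], []) t = (parseCleanB t, []) := by simp [loopF]
      rw [List.foldl_cons, hstep, foldl_loop rest _ [] (parseCleanB_ne_nil t)]
      cases hr : rest.getLast? with
      | none =>
          have : rest = [] := List.getLast?_eq_none_iff.mp hr
          subst this
          simp
      | some c =>
          have hne : rest ≠ [] := by intro h; subst h; simp at hr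
          have hget : PySem.List.pyGetD (t :: rest) (-1) "" = c := by
            rw [PySem.List.pyGetD_neg_one (xs := t :: rest) (h := List.cons_ne_nil _ _)]
            rw [List.getLast_cons hne]
            exact Option.some_injective _ ((List.getLast?_eq_some_getLast hne).symm.trans hr)
          simp [hget, List.length_pos_iff.mpr hne]
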